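-- pv_equiv track=rewrite | github.com/FriderickYu/Z3_Ex | core/z3_validator.py | _find_main_operator_position
-- ===== SOURCE A (Python) =====
-- def _find_main_operator_position(expr_str: str, operator: str) -> int:
--     """找到不在括号内的主要操作符位置"""
--     paren_depth = 0
--     i = 0
--     while i < len(expr_str):
--         if expr_str[i] == '(':
--             paren_depth += 1
--         elif expr_str[i] == ')':
--             paren_depth -= 1
--         elif paren_depth == 0 and expr_str[i:].startswith(operator):
--             return i
--         i += 1
--     return -1
-- ===== SOURCE B (Python) =====
-- def _find_main_operator_position(expr_str: str, operator: str) -> int: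
--     # Candidate-driven search (no per-character Python loop): str.find enumerates occurrences of the
--     # operator; accept the first one that sits at a non-parenthesis
--     # character whose prefix has balanced parentheses (depth 0).
--     n = len(expr_str)
--     start = 0
--     while start <= n:
--         i = expr_str.find(operator, start)
--         if i == -1 or i == n:
--             return -1
--         prefix = expr_str[:i]
--         if expr_str[i] not in '()' and prefix.count('(') == prefix.count(')'):
--             return i
--         start = i + 1
--     return -1
-- ===== Notes on version B (the rewrite author's own statement) =====
-- stated objective: faster
-- what changed: Replaces A's character-by-character Python scan with a mutable depth counter by a candidate-driven search: str.find enumerates occurrences of the operator and each candidate is validated by comparing '(' and ')' counts of its prefix, so no per-character Python loop remains.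
import Mathlib
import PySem

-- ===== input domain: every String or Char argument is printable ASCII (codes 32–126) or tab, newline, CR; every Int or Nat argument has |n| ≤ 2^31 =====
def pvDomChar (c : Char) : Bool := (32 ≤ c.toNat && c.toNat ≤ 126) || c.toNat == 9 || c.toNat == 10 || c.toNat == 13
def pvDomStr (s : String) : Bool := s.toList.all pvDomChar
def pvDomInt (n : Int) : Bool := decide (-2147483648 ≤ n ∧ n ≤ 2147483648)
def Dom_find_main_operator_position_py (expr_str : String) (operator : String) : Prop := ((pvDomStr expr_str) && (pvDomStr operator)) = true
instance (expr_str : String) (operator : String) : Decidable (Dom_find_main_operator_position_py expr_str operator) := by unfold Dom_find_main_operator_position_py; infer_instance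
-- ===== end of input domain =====

-- B replaces A's character-by-character depth-tracking scan by a candidate-driven search:
-- str.find enumerates operator occurrences and each candidate is validated by counting
-- parentheses in its prefix (measurably faster in Python: the passes run in C).

-- ===== PORT A =====
-- A's while loop: mutable depth counter, inline suffix match at every character.
def pvGoA (cs : List Char) (op : List Char) (d : Int) (i : Int) : Int :=
  match cs with
  | [] => -1
  | c :: rest =>
    if c = '(' then pvGoA rest op (d + 1) (i + 1)
    else if c = ')' then pvGoA rest op (d - 1) (i + 1)
    else if d = 0 ∧ PySem.Chars.startswith (c :: rest) op then i
    else pvGoA rest op d (i + 1)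

def find_main_operator_position_py (expr_str : String) (operator : String) : Int :=
  pvGoA expr_str.toList operator.toList 0 0

-- ===== PORT B =====
-- Source B line `i = expr_str.find(operator, start)` (named so the loop can refer to it)
def pvFindB (all : List Char) (op : List Char) (start : Nat) : Int :=
  PySem.Chars.findFrom all op (start : Int) none

-- Source B's while loop: accept candidate i iff expr_str[i] is not a parenthesis and
-- expr_str[:i] has equal '(' and ')' counts; otherwise continue from i + 1.
def pvLoopB (all : List Char) (op : List Char) (start : Nat) : Int :=
  if hs : start ≤ all.length then
    if hne : pvFindB all op start = -1 ∨ pvFindB all op start = (all.length : Int) then -1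
    else
      -- expr_str[i]; the `none` branch is an unreachable IndexError guard (find returned a valid index)
      match PySem.List.pyGet? all (pvFindB all op start) with
      | none => -1
      | some c =>
        if c ≠ '(' ∧ c ≠ ')' ∧
            PySem.Chars.count (all.take (pvFindB all op start).toNat) ['('] =
              PySem.Chars.count (all.take (pvFindB all op start).toNat) [')'] then
          pvFindB all op start
        else pvLoopB all op ((pvFindB all op start).toNat + 1)
  else -1
termination_by all.length + 1 - start
decreasing_by
  have h := PySem.Chars.findFrom_natCast_spec all op start hs (by
    intro h0; exact hne (Or.inl (by rw [pvFindB]; exact h0)))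
  rw [pvFindB]
  omega

def find_main_operator_position_py_alt (expr_str : String) (operator : String) : Int :=
  pvLoopB expr_str.toList operator.toList 0

-- ===== PRECONDITION & SPEC =====
def Spec_find_main_operator_position_py (expr_str : String) (operator : String) (out : Int) : Prop := out = find_main_operator_position_py_alt expr_str operator
instance (expr_str : String) (operator : String) (out : Int) : Decidable (Spec_find_main_operator_position_py expr_str operator out) := by unfold Spec_find_main_operator_position_py; infer_instance

-- ===== CLAIM (what is proved, stated in full; the proofs are below) =====
def Claim_equal_find_main_operator_position_py : Prop := ∀ (expr_str : String) (operator : String), Dom_find_main_operator_position_py expr_str operator → Spec_find_main_operator_position_py expr_str operator (find_main_operator_position_py expr_str operator)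

-- ===== LEMMAS AND PROOFS =====

-- Common reference function: scan from index k with accumulated paren counts (p,q);
-- return the first index whose char is not a parenthesis, with p = q and an operator match.
def pvF (cs : List Char) (op : List Char) (p q k : Nat) : Int :=
  match cs with
  | [] => -1
  | c :: rest =>
    if c ≠ '(' ∧ c ≠ ')' ∧ p = q ∧ PySem.Chars.startswith (c :: rest) op then (k : Int)
    else pvF rest op (if c = '(' then p + 1 else p) (if c = ')' then q + 1 else q) (k + 1)

theorem pvGoA_eq_pvF (cs op : List Char) (p q k : Nat) :
    pvGoA cs op ((p : Int) - (q : Int)) (k : Int) = pvF cs op p q k := by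
  induction cs generalizing p q k with
  | nil => rfl
  | cons c rest ih =>
    rw [pvGoA, pvF]
    by_cases h1 : c = '('
    · rw [if_pos h1, if_neg (by simp [h1]), if_pos h1, if_neg (by simp [h1])]
      rw [show ((p : Int) - q) + 1 = ((p+1 : Nat) : Int) - (q : Nat) by push_cast; ring,
          show ((k:Int)+1) = ((k+1:Nat):Int) by push_cast; ring, ih]
    · by_cases h2 : c = ')'
      · rw [if_neg h1, if_pos h2, if_neg (by simp [h2]), if_neg (by simp [h1]), if_pos h2]
        rw [show ((p : Int) - q) - 1 = ((p : Nat) : Int) - ((q+1 : Nat) : Int) by push_cast; ring,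
            show ((k:Int)+1) = ((k+1:Nat):Int) by push_cast; ring, ih]
      · have hpq : ((p : Int) - q = 0) ↔ (p = q) := by omega
        by_cases h3 : p = q ∧ PySem.Chars.startswith (c :: rest) op = true
        · rw [if_neg h1, if_neg h2, if_pos (by rw [hpq]; exact h3), if_pos ⟨h1, h2, h3.1, h3.2⟩]
        · rw [if_neg h1, if_neg h2, if_neg (by rw [hpq]; exact h3), if_neg (by tauto),
              if_neg h1, if_neg h2,
              show ((k:Int)+1) = ((k+1:Nat):Int) by push_cast; ring, ih]

theorem pvCountGo_singleton (c : Char) (l : List Char) (fuel acc : Nat) (h : l.length ≤ fuel) :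
    PySem.Chars.count.go [c] fuel l acc = acc + l.count c := by
  induction l generalizing fuel acc with
  | nil => cases fuel <;> simp [PySem.Chars.count.go]
  | cons x t ih =>
    obtain ⟨fuel, rfl⟩ : ∃ f, fuel = f + 1 := ⟨fuel - 1, by simp at h; omega⟩
    rw [PySem.Chars.count.go]
    by_cases hx : x = c
    · have hp : [c].isPrefixOf (x :: t) = true := by simp [List.isPrefixOf, hx]
      rw [if_pos hp]
      simp only [List.length_singleton, List.drop_succ_cons, List.drop_zero]
      rw [ih _ _ (by simp at h; omega)]
      simp [hx]; omega
    · have hp : [c].isPrefixOf (x :: t) = false := by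
        simp [List.isPrefixOf]; exact fun hh => hx hh.symm
      rw [if_neg (by simp [hp])]
      rw [ih _ _ (by simp at h; omega)]
      simp [hx]

theorem pvCount_singleton (s : List Char) (c : Char) :
    PySem.Chars.count s [c] = s.count c := by
  rw [PySem.Chars.count]
  simp [pvCountGo_singleton c s s.length 0 le_rfl]

theorem pvCount_take_succ (all : List Char) (j : Nat) (hlt : j < all.length) (c' : Char) :
    (all.take (j+1)).count c' = (all.take j).count c' + (if all[j] = c' then 1 else 0) := by
  rw [List.take_add_one, List.count_append]
  simp [List.getElem?_eq_getElem hlt]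
  by_cases hh : all[j] = c' <;> simp [hh]

theorem pvF_none (cs op : List Char) (p q k : Nat) (h : ¬ op <:+: cs) :
    pvF cs op p q k = -1 := by
  induction cs generalizing p q k with
  | nil => rfl
  | cons c rest ih =>
    rw [pvF, if_neg, ih]
    · exact fun hinf => h (hinf.trans (List.suffix_cons c rest).isInfix)
    · rintro ⟨-, -, -, hsw⟩
      exact h ((PySem.Chars.startswith_iff _ _ |>.mp hsw).isInfix)

theorem pvF_skip (all op : List Char) (start j : Nat) (h1 : start ≤ j) (h2 : j ≤ all.length)
    (h3 : ∀ i, start ≤ i → i < j → ¬ op <+: all.drop i) :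
    pvF (all.drop start) op ((all.take start).count '(') ((all.take start).count ')') start =
      pvF (all.drop j) op ((all.take j).count '(') ((all.take j).count ')') j := by
  obtain ⟨m, rfl⟩ : ∃ m, j = start + m := ⟨j - start, by omega⟩
  clear h1
  induction m generalizing start with
  | zero => rfl
  | succ m ih =>
    have hlt : start < all.length := by omega
    have hdrop : all.drop start = all[start] :: all.drop (start + 1) :=
      (List.getElem_cons_drop hlt).symm
    rw [hdrop, pvF, if_neg]
    · have hc1 : (if all[start] = '(' then (all.take start).count '(' + 1 else (all.take start).count '(') = (all.take (start+1)).count '(' := by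
        rw [pvCount_take_succ all start hlt]
        by_cases hh : all[start] = '(' <;> simp [hh]
      have hc2 : (if all[start] = ')' then (all.take start).count ')' + 1 else (all.take start).count ')') = (all.take (start+1)).count ')' := by
        rw [pvCount_take_succ all start hlt]
        by_cases hh : all[start] = ')' <;> simp [hh]
      rw [hc1, hc2]
      have := ih (start + 1) (by omega) (fun i hi1 hi2 => h3 i (by omega) (by omega))
      rw [show start + (m + 1) = (start + 1) + m by omega]
      exact this
    · rintro ⟨-, -, -, hsw⟩
      exact h3 start le_rfl (by omega) (by rw [hdrop]; exact (PySem.Chars.startswith_iff _ _).mp hsw)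

theorem pvLoopB_eq_pvF_fuel (all op : List Char) (fuel : Nat) :
    ∀ start, start ≤ all.length → all.length - start ≤ fuel →
    pvLoopB all op start =
      pvF (all.drop start) op ((all.take start).count '(') ((all.take start).count ')') start := by
  induction fuel with
  | zero =>
    intro start hs hf
    have hsn : start = all.length := by omega
    subst hsn
    rw [pvLoopB, dif_pos le_rfl]
    simp only [List.drop_length, pvF]
    by_cases hf1 : pvFindB all op all.length = -1
    · rw [dif_pos (Or.inl hf1)]
    · have hspec := PySem.Chars.findFrom_natCast_spec all op all.length le_rfl
        (by rw [← pvFindB]; exact hf1)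
      have hle : pvFindB all op all.length ≤ (all.length : Int) := by
        rw [pvFindB, PySem.Chars.findFrom_natCast all op all.length le_rfl]
        have := PySem.Chars.find_le_length (all.drop all.length) op
        simp at this ⊢
        split <;> omega
      rw [dif_pos (Or.inr (le_antisymm hle (by rw [pvFindB]; exact hspec.1)))]
  | succ fuel ih =>
    intro start hs hf
    rw [pvLoopB, dif_pos hs]
    by_cases hf1 : pvFindB all op start = -1
    · rw [dif_pos (Or.inl hf1)]
      have hni := (PySem.Chars.findFrom_natCast_eq_neg_one_iff all op start hs).mp
        (by rw [← pvFindB]; exact hf1)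
      rw [pvF_none _ _ _ _ _ hni]
    · obtain ⟨hge, hpre, hmin⟩ := PySem.Chars.findFrom_natCast_spec all op start hs
        (by rw [← pvFindB]; exact hf1)
      rw [← pvFindB] at hge hpre hmin
      set f := pvFindB all op start with hfdef
      have hf0 : 0 ≤ f := le_trans (by exact_mod_cast Nat.zero_le start) hge
      have hfj : f = (f.toNat : Int) := (Int.toNat_of_nonneg hf0).symm
      have hjle : f.toNat ≤ all.length := by
        have hle : f ≤ (all.length : Int) := by
          rw [hfdef, pvFindB, PySem.Chars.findFrom_natCast all op start hs]
          have := PySem.Chars.find_le_length (all.drop start) op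
          simp [List.length_drop] at this ⊢
          split <;> omega
        omega
      have hjge : start ≤ f.toNat := by omega
      by_cases hjn : f.toNat = all.length
      · rw [dif_pos (Or.inr (by omega))]
        rw [hjn, List.drop_length] at hpre
        have hop : op = [] := List.prefix_nil.mp hpre
        have hstart : start = all.length := by
          by_contra hne
          exact hmin start le_rfl (by omega) (by simp [hop])
        rw [hstart, List.drop_length, pvF]
      · have hjlt : f.toNat < all.length := by omega
        rw [dif_neg (by
          rintro (h | h)
          · exact hf1 h
          · exact hjn (by rw [h]; simp))]
        have hget : PySem.List.pyGet? all f = some all[f.toNat] := by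
          conv_lhs => rw [hfj]
          rw [PySem.List.pyGet?_natCast, List.getElem?_eq_getElem hjlt]
        simp only [hget]
        rw [pvCount_singleton, pvCount_singleton]
        have hskip := pvF_skip all op start f.toNat hjge hjle
          (fun i hi1 hi2 => hmin i hi1 hi2)
        rw [hskip]
        have hdropj : all.drop f.toNat = all[f.toNat] :: all.drop (f.toNat + 1) :=
          (List.getElem_cons_drop hjlt).symm
        have hsw : PySem.Chars.startswith (all.drop f.toNat) op = true :=
          (PySem.Chars.startswith_iff _ _).mpr hpre
        rw [hdropj] at hsw
        rw [hdropj, pvF]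
        by_cases hcond : all[f.toNat] ≠ '(' ∧ all[f.toNat] ≠ ')' ∧
            (all.take f.toNat).count '(' = (all.take f.toNat).count ')'
        · rw [if_pos hcond]
          have hF : all[f.toNat] ≠ '(' ∧ all[f.toNat] ≠ ')' ∧
              (all.take f.toNat).count '(' = (all.take f.toNat).count ')' ∧
              PySem.Chars.startswith (all[f.toNat] :: all.drop (f.toNat + 1)) op = true :=
            ⟨hcond.1, hcond.2.1, hcond.2.2, hsw⟩
          rw [if_pos hF]
          exact hfj
        · rw [if_neg hcond, if_neg (by rintro ⟨ha, hb, hc, -⟩; exact hcond ⟨ha, hb, hc⟩)]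
          have hc1 : (if all[f.toNat] = '(' then (all.take f.toNat).count '(' + 1 else (all.take f.toNat).count '(') = (all.take (f.toNat+1)).count '(' := by
            rw [pvCount_take_succ all f.toNat hjlt]
            by_cases hh : all[f.toNat] = '(' <;> simp [hh]
          have hc2 : (if all[f.toNat] = ')' then (all.take f.toNat).count ')' + 1 else (all.take f.toNat).count ')') = (all.take (f.toNat+1)).count ')' := by
            rw [pvCount_take_succ all f.toNat hjlt]
            by_cases hh : all[f.toNat] = ')' <;> simp [hh]
          rw [hc1, hc2]
          exact ih (f.toNat + 1) (by omega) (by omega)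

theorem pvLoopB_eq_pvF (all op : List Char) (start : Nat) (hs : start ≤ all.length) :
    pvLoopB all op start =
      pvF (all.drop start) op ((all.take start).count '(') ((all.take start).count ')') start :=
  pvLoopB_eq_pvF_fuel all op (all.length - start) start hs le_rfl

-- ===== VERDICT (by name: the statement is the Claim_ definition above) =====
theorem find_main_operator_position_py_spec : Claim_equal_find_main_operator_position_py := by
  intro e op _
  unfold Spec_find_main_operator_position_py find_main_operator_position_py find_main_operator_position_py_alt
  have hA := pvGoA_eq_pvF e.toList op.toList 0 0 0
  have hB := pvLoopB_eq_pvF e.toList op.toList 0 (Nat.zero_le _)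
  simp at hA hB
  rw [hA, hB]
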